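-- pv_equiv track=rewrite | github.com/dubey-suhin/Project | NEW/new_hash.py | next_valid_pixel
-- ===== SOURCE A (Python) =====
-- def next_valid_pixel(width, height, current_x, current_y, step):
--     while True:
--         if (current_x + current_y) % step == 0:
--             return current_x, current_y
--         current_x += 1
--         if current_x >= width:
--             current_x = 0
--             current_y += 1
--         if current_y >= height:
--             return 0, 0  # Start over if we reach the end of the image
-- ===== SOURCE B (Python) =====
-- def next_valid_pixel(width, height, current_x, current_y, step):
--     s = abs(step)
--     if (current_x + current_y) % s == 0:
--         return current_x, current_y
--     if current_y < height:
--         # jump to the first hit in the remainder of the current row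
--         nx = current_x + 1 + (-(current_x + 1 + current_y)) % s
--         if nx < width:
--             return nx, current_y
--     if width >= 1:
--         # jump to the first later row that contains a hit: row y holds one at
--         # x = (-y) % s whenever that offset fits inside the row
--         y = current_y + 1
--         c = (-y) % s
--         if c >= width:
--             y += c - width + 1
--         if y < height:
--             return (-y) % s, y
--     return 0, 0
-- ===== Notes on version B (the rewrite author's own statement) =====
-- stated objective: faster
-- what changed: A scans pixel by pixel in a while-loop until (x+y)%step==0; B computes the answer with two O(1) residue jumps: the first hit in the remainder of the current row, else the first later row whose hit offset (-y)%s fits inside the row (Pre_ excludes only step=0, where both raise ZeroDivisionError).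
-- intended difference: On zero-width images whose scan reaches the rows below the current pixel, A still tests x=0 of every later row (its bound check runs after the test) and returns (0,y') for the first later row index y' divisible by step when 0!=y'<height, e.g. (0,2) for (0,3,1,0,2); B returns the fallback (0,0), the intended value since an image with no columns contains no pixel to report. — e.g. on next_valid_pixel(0, 3, 1, 0, 2): A returns [0, 2], B returns [0, 0]
import Mathlib
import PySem

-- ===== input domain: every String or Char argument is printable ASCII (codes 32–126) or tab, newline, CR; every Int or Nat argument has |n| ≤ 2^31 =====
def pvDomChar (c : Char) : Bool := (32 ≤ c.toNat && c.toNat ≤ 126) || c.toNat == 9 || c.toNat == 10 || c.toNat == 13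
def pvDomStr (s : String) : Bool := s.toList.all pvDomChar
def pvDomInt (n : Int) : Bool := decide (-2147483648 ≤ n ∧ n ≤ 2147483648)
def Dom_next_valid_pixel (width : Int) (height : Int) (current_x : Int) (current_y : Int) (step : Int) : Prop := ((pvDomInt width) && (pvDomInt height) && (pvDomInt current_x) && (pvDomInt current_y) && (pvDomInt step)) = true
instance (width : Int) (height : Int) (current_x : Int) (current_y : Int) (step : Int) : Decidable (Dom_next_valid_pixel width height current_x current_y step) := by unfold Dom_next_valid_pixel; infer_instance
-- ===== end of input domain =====

-- B replaces A's pixel-by-pixel scan with two O(1) residue jumps (first hit in the rest of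
-- the current row, else first later row containing a hit); on zero-width images A walks a
-- phantom x=0 column while B reports no pixel (stated as an intended difference D_).

-- ===== PORT A =====
-- fuel bound: a measure that strictly decreases on every iteration of A's loop
-- (row change drops the first summand by width.toNat+1, a plain step drops the second)
def pvFuel (width : Int) (height : Int) (x : Int) (y : Int) : Nat :=
  (height - y).toNat * (width.toNat + 1) + (width - x).toNat + 1

-- A's `while True` loop, one recursive call per loop iteration; the fuel is only a
-- totality guard (pv_loopA_eq below shows pvFuel is never exhausted).
def pvLoopA (width : Int) (height : Int) (step : Int) : Nat → Int → Int → List Int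
  | 0, _, _ => [0, 0]
  | fuel + 1, x, y =>
    if PySem.Int.mod (x + y) step == 0 then [x, y]
    else
      if x + 1 ≥ width then
        if y + 1 ≥ height then [0, 0]
        else pvLoopA width height step fuel 0 (y + 1)
      else
        if y ≥ height then [0, 0]
        else pvLoopA width height step fuel (x + 1) y

def next_valid_pixel (width : Int) (height : Int) (current_x : Int) (current_y : Int) (step : Int) : List Int :=
  pvLoopA width height step (pvFuel width height current_x current_y) current_x current_y

-- ===== PORT B =====
def next_valid_pixel_alt (width : Int) (height : Int) (current_x : Int) (current_y : Int) (step : Int) : List Int :=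
  let s : Int := step.natAbs
  if PySem.Int.mod (current_x + current_y) s == 0 then [current_x, current_y]
  else
    -- jump to the first hit in the remainder of the current row
    let nx := current_x + 1 + PySem.Int.mod (-(current_x + 1 + current_y)) s
    if current_y < height ∧ nx < width then [nx, current_y]
    else if width ≥ 1 then
      -- jump to the first later row that contains a hit: row y holds one at
      -- x = (-y) % s whenever that offset fits inside the row
      let y0 := current_y + 1
      let c := PySem.Int.mod (-y0) s
      let y := if c ≥ width then y0 + (c - width + 1) else y0
      if y < height then [PySem.Int.mod (-y) s, y] else [0, 0]
    else [0, 0]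

-- ===== PRECONDITION & SPEC =====
-- Pre_ excludes exactly step = 0, on which Python A raises ZeroDivisionError (B raises too).
def Pre_next_valid_pixel (width : Int) (height : Int) (current_x : Int) (current_y : Int) (step : Int) : Prop := step ≠ 0
instance (width : Int) (height : Int) (current_x : Int) (current_y : Int) (step : Int) : Decidable (Pre_next_valid_pixel width height current_x current_y step) := by unfold Pre_next_valid_pixel; infer_instance
def pvWitness_next_valid_pixel : Int × Int × Int × Int × Int := (5, 4, 1, 2, 3)

-- On images with width ≤ 0 (no columns) whose scan reaches the rows below the current one,
-- A still tests x = 0 of every later row (the test precedes the bound check) and returns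
-- (0, y') for the first later row index y' divisible by step when 0 ≠ y' < height; B returns
-- the fallback (0, 0), the intended value since an empty image contains no pixel to report.
-- first multiple of step at or after b (for step ≠ 0)
def pvNextMul (step : Int) (b : Int) : Int := b + (-b) % (step.natAbs : Int)

def D_next_valid_pixel (width : Int) (height : Int) (current_x : Int) (current_y : Int) (step : Int) : Prop :=
  width ≤ 0 ∧ ¬ step ∣ (current_x + current_y) ∧
  width ≤ pvNextMul step (current_x + current_y + 1) - current_y ∧
  pvNextMul step (current_y + 1) < height ∧ pvNextMul step (current_y + 1) ≠ 0
instance (width : Int) (height : Int) (current_x : Int) (current_y : Int) (step : Int) : Decidable (D_next_valid_pixel width height current_x current_y step) := by unfold D_next_valid_pixel; infer_instance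

def Spec_next_valid_pixel (width : Int) (height : Int) (current_x : Int) (current_y : Int) (step : Int) (out : List Int) : Prop := ¬ D_next_valid_pixel width height current_x current_y step → out = next_valid_pixel_alt width height current_x current_y step
instance (width : Int) (height : Int) (current_x : Int) (current_y : Int) (step : Int) (out : List Int) : Decidable (Spec_next_valid_pixel width height current_x current_y step out) := by unfold Spec_next_valid_pixel; infer_instance

def pvDiffWitness_next_valid_pixel : Int × Int × Int × Int × Int := (0, 3, 1, 0, 2)
def pvDiffWitnessOut_next_valid_pixel : (List Int) × (List Int) := ([0, 2], [0, 0])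

-- ===== CLAIM (what is proved, stated in full; the proofs are below) =====
def Claim_unchanged_next_valid_pixel : Prop := ∀ (width : Int) (height : Int) (current_x : Int) (current_y : Int) (step : Int), Dom_next_valid_pixel width height current_x current_y step → Pre_next_valid_pixel width height current_x current_y step → Spec_next_valid_pixel width height current_x current_y step (next_valid_pixel width height current_x current_y step)
def Claim_changed_next_valid_pixel : Prop := Dom_next_valid_pixel (pvDiffWitness_next_valid_pixel.1) (pvDiffWitness_next_valid_pixel.2.1) (pvDiffWitness_next_valid_pixel.2.2.1) (pvDiffWitness_next_valid_pixel.2.2.2.1) (pvDiffWitness_next_valid_pixel.2.2.2.2) ∧ Pre_next_valid_pixel (pvDiffWitness_next_valid_pixel.1) (pvDiffWitness_next_valid_pixel.2.1) (pvDiffWitness_next_valid_pixel.2.2.1) (pvDiffWitness_next_valid_pixel.2.2.2.1) (pvDiffWitness_next_valid_pixel.2.2.2.2) ∧ D_next_valid_pixel (pvDiffWitness_next_valid_pixel.1) (pvDiffWitness_next_valid_pixel.2.1) (pvDiffWitness_next_valid_pixel.2.2.1) (pvDiffWitness_next_valid_pixel.2.2.2.1) (pvDiffWitness_next_valid_pixel.2.2.2.2)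 ∧ next_valid_pixel (pvDiffWitness_next_valid_pixel.1) (pvDiffWitness_next_valid_pixel.2.1) (pvDiffWitness_next_valid_pixel.2.2.1) (pvDiffWitness_next_valid_pixel.2.2.2.1) (pvDiffWitness_next_valid_pixel.2.2.2.2) = pvDiffWitnessOut_next_valid_pixel.1 ∧ next_valid_pixel_alt (pvDiffWitness_next_valid_pixel.1) (pvDiffWitness_next_valid_pixel.2.1) (pvDiffWitness_next_valid_pixel.2.2.1) (pvDiffWitness_next_valid_pixel.2.2.2.1) (pvDiffWitness_next_valid_pixel.2.2.2.2) = pvDiffWitnessOut_next_valid_pixel.2 ∧ pvDiffWitnessOut_next_valid_pixel.1 ≠ pvDiffWitnessOut_next_valid_pixel.2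
def Claim_exact_next_valid_pixel : Prop := ∀ (width : Int) (height : Int) (current_x : Int) (current_y : Int) (step : Int), Dom_next_valid_pixel width height current_x current_y step → Pre_next_valid_pixel width height current_x current_y step → D_next_valid_pixel width height current_x current_y step → next_valid_pixel width height current_x current_y step ≠ next_valid_pixel_alt width height current_x current_y step

-- ===== LEMMAS AND PROOFS =====

-- what A actually returns once it has to search the rows below row `b`
def pvRows (width : Int) (height : Int) (s : Int) (b : Int) : List Int :=
  if width ≥ 1 then
    let c := PySem.Int.mod (-b) s
    let b' := if c ≥ width then b + (c - width + 1) else b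
    if b' < height then [PySem.Int.mod (-b') s, b'] else [0, 0]
  else
    let m := b + PySem.Int.mod (-b) s
    if m < height then [0, m] else [0, 0]

-- closed-form characterisation of A's result from an arbitrary loop state
def pvF (width : Int) (height : Int) (s : Int) (x : Int) (y : Int) : List Int :=
  if PySem.Int.mod (x + y) s == 0 then [x, y]
  else
    let nx := x + 1 + PySem.Int.mod (-(x + 1 + y)) s
    if y < height ∧ nx < width then [nx, y]
    else pvRows width height s (y + 1)

-- pvNextMul written through PySem's mod (step ≠ 0)
theorem pv_nextMul_eq (step b : Int) (hs : (0:Int) < step.natAbs) :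
    pvNextMul step b = b + PySem.Int.mod (-b) (step.natAbs : Int) := by
  rw [pvNextMul, PySem.Int.mod_eq_emod_of_pos hs]

theorem pv_mod_neg_succ (s n : Int) (hs : 0 < s) (h1 : 1 ≤ PySem.Int.mod (-n) s) :
    PySem.Int.mod (-(n + 1)) s = PySem.Int.mod (-n) s - 1 := by
  rw [PySem.Int.mod_eq_emod_of_pos hs] at h1 ⊢
  rw [PySem.Int.mod_eq_emod_of_pos hs]
  have hlt : (-n) % s < s := Int.emod_lt_of_pos _ hs
  have hdiv := Int.emod_add_mul_ediv (-n) s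
  have h2 : -(n+1) = ((-n) % s - 1) + s * ((-n) / s) := by linarith
  rw [h2, Int.add_mul_emod_self_left, Int.emod_eq_of_lt (by omega) (by omega)]

theorem pv_mod_neg_pos (s n : Int) (hs : 0 < s) (hnd : ¬ s ∣ n) :
    1 ≤ PySem.Int.mod (-n) s := by
  have h0 : 0 ≤ PySem.Int.mod (-n) s := PySem.Int.mod_nonneg _ hs
  have : PySem.Int.mod (-n) s ≠ 0 := by
    rw [Ne, PySem.Int.mod_eq_zero_iff_dvd, dvd_neg]; exact hnd
  omega

theorem pv_cond_iff (step n : Int) :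
    (PySem.Int.mod n (step.natAbs : Int) == 0) = (PySem.Int.mod n step == 0) := by
  rcases Bool.eq_false_or_eq_true (PySem.Int.mod n step == 0) with h | h <;>
    rw [h] <;> simp only [beq_iff_eq, beq_eq_false_iff_ne, Ne] at * <;>
    rw [PySem.Int.mod_eq_zero_iff_dvd] at * <;> simp [h]

-- a row past the bottom of the image yields the fallback
theorem pv_rows_late (width height s b : Int) (hs : 0 < s) (hb : b ≥ height) :
    pvRows width height s b = [0, 0] := by
  have h0 : 0 ≤ PySem.Int.mod (-b) s := PySem.Int.mod_nonneg _ hs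
  simp only [pvRows]
  split_ifs <;> first | rfl | omega

-- a fruitless row may be skipped
theorem pv_rows_shift (width height s b : Int) (hs : 0 < s)
    (h1 : 1 ≤ PySem.Int.mod (-b) s) (hc : PySem.Int.mod (-b) s ≥ width) :
    pvRows width height s b = pvRows width height s (b + 1) := by
  have hstep := pv_mod_neg_succ s b hs h1
  simp only [pvRows, hstep]
  by_cases hw : width ≥ 1
  · rw [if_pos hw, if_pos hw]
    have heq : (if PySem.Int.mod (-b) s ≥ width then b + (PySem.Int.mod (-b) s - width + 1) else b)
        = (if PySem.Int.mod (-b) s - 1 ≥ width then b + 1 + (PySem.Int.mod (-b) s - 1 - width + 1)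
           else b + 1) := by
      split_ifs <;> omega
    rw [if_pos hc]
    split_ifs with h2 h3 h4 <;> first
      | (exfalso; omega)
      | rfl
      | (congr 2 <;> omega)
  · rw [if_neg hw, if_neg hw]
    have : b + PySem.Int.mod (-b) s = b + 1 + (PySem.Int.mod (-b) s - 1) := by ring
    rw [this]

-- the rows search equals the closed form restarted at column 0
theorem pv_rows_eq_F (width height s b : Int) (hs : 0 < s) (hb : b < height) :
    pvRows width height s b = pvF width height s 0 b := by
  by_cases hd : s ∣ b
  · have h0 : PySem.Int.mod (-b) s = 0 := by
      rw [PySem.Int.mod_eq_zero_iff_dvd, dvd_neg]; exact hd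
    have hc : (PySem.Int.mod (0 + b) s == 0) = true := by
      simp only [zero_add, beq_iff_eq, PySem.Int.mod_eq_zero_iff_dvd]; exact hd
    simp only [pvF, hc, if_true]
    by_cases hw : width ≥ 1
    · simp only [pvRows, h0, if_pos hw, if_neg (by omega : ¬ (0:Int) ≥ width), if_pos hb]
    · simp only [pvRows, h0, if_neg hw, add_zero, if_pos hb]
  · have h1 : 1 ≤ PySem.Int.mod (-b) s := pv_mod_neg_pos s b hs hd
    have hc : (PySem.Int.mod (0 + b) s == 0) = false := by
      simp only [zero_add, beq_eq_false_iff_ne, Ne, PySem.Int.mod_eq_zero_iff_dvd]; exact hd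
    have hnx : 0 + 1 + PySem.Int.mod (-(0 + 1 + b)) s = PySem.Int.mod (-b) s := by
      have : -(0 + 1 + b) = -(b + 1) := by ring
      rw [this, pv_mod_neg_succ s b hs h1]; ring
    simp only [pvF, hc, Bool.false_eq_true, if_false, hnx]
    by_cases hin : PySem.Int.mod (-b) s < width
    · rw [if_pos ⟨hb, hin⟩]
      have hw : width ≥ 1 := by omega
      simp only [pvRows, if_pos hw, if_neg (by omega : ¬ PySem.Int.mod (-b) s ≥ width), if_pos hb]
    · rw [if_neg (by tauto)]
      exact pv_rows_shift width height s b hs h1 (by omega)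

-- stepping one pixel to the right inside a row preserves the closed form
theorem pv_F_step (width height s x y : Int) (hs : 0 < s)
    (hmiss : ¬ s ∣ (x + y)) (hw : x + 1 < width) (hh : y < height) :
    pvF width height s x y = pvF width height s (x + 1) y := by
  have hc : (PySem.Int.mod (x + y) s == 0) = false := by
    simp only [beq_eq_false_iff_ne, Ne, PySem.Int.mod_eq_zero_iff_dvd]; exact hmiss
  by_cases hd : s ∣ (x + 1 + y)
  · have hc2 : (PySem.Int.mod (x + 1 + y) s == 0) = true := by
      simp only [beq_iff_eq, PySem.Int.mod_eq_zero_iff_dvd]; exact hd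
    have h0 : PySem.Int.mod (-(x + 1 + y)) s = 0 := by
      rw [PySem.Int.mod_eq_zero_iff_dvd, dvd_neg]; exact hd
    simp only [pvF, hc, Bool.false_eq_true, if_false, hc2, if_pos, h0, add_zero]
    rw [if_pos ⟨hh, hw⟩]
  · have hc2 : (PySem.Int.mod (x + 1 + y) s == 0) = false := by
      simp only [beq_eq_false_iff_ne, Ne, PySem.Int.mod_eq_zero_iff_dvd]; exact hd
    have h1 : 1 ≤ PySem.Int.mod (-(x + 1 + y)) s := pv_mod_neg_pos s _ hs hd
    have hnx : x + 1 + 1 + PySem.Int.mod (-(x + 1 + 1 + y)) s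
        = x + 1 + PySem.Int.mod (-(x + 1 + y)) s := by
      have : -(x + 1 + 1 + y) = -((x + 1 + y) + 1) := by ring
      rw [this, pv_mod_neg_succ s (x + 1 + y) hs h1]; ring
    simp only [pvF, hc, Bool.false_eq_true, if_false, hc2, hnx]

-- the fueled loop computes the closed form
theorem pv_loopA_eq (width height step : Int) (hs : step ≠ 0) : ∀ (fuel : Nat) (x y : Int),
    pvFuel width height x y ≤ fuel →
    pvLoopA width height step fuel x y = pvF width height (step.natAbs : Int) x y := by
  have hpos : (0:Int) < step.natAbs := by simp [hs]
  intro fuel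
  induction fuel with
  | zero => intro x y hf; exfalso; unfold pvFuel at hf; omega
  | succ fuel ih =>
    intro x y hf
    by_cases h : (PySem.Int.mod (x + y) step == 0) = true
    · rw [pvLoopA, if_pos h]
      simp only [pvF, pv_cond_iff step (x + y), h, if_true]
    · have hc : (PySem.Int.mod (x + y) (step.natAbs : Int) == 0) = false := by
        rw [pv_cond_iff]; exact eq_false_of_ne_true h
      have hmiss : ¬ (step.natAbs : Int) ∣ (x + y) := by
        have := hc; simp only [beq_eq_false_iff_ne, Ne, PySem.Int.mod_eq_zero_iff_dvd] at this
        exact this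
      have h1 : 1 ≤ PySem.Int.mod (-(x + 1 + y)) (step.natAbs : Int) ∨
          PySem.Int.mod (-(x + 1 + y)) (step.natAbs : Int) = 0 := by
        have := PySem.Int.mod_nonneg (-(x + 1 + y)) hpos; omega
      have hnxge : x + 1 ≤ x + 1 + PySem.Int.mod (-(x + 1 + y)) (step.natAbs : Int) := by
        have := PySem.Int.mod_nonneg (-(x + 1 + y)) hpos; omega
      rw [pvLoopA, if_neg h]
      by_cases hw : x + 1 ≥ width
      · by_cases hh : y + 1 ≥ height
        · rw [if_pos hw, if_pos hh]
          simp only [pvF, hc, Bool.false_eq_true, if_false]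
          rw [if_neg (by omega), pv_rows_late width height _ (y + 1) hpos (by omega)]
        · have hdec : pvFuel width height 0 (y + 1) ≤ fuel := by
            unfold pvFuel at hf ⊢
            have h1 : (height - y).toNat = (height - (y + 1)).toNat + 1 := by omega
            rw [h1, Nat.succ_mul] at hf
            generalize (height - (y + 1)).toNat * (width.toNat + 1) = K at *
            omega
          rw [if_pos hw, if_neg hh, ih 0 (y + 1) hdec,
            ← pv_rows_eq_F width height _ (y + 1) hpos (by omega)]
          simp only [pvF, hc, Bool.false_eq_true, if_false]
          rw [if_neg (by omega)]
      · by_cases hh : y ≥ height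
        · rw [if_neg hw, if_pos hh]
          simp only [pvF, hc, Bool.false_eq_true, if_false]
          rw [if_neg (by omega), pv_rows_late width height _ (y + 1) hpos (by omega)]
        · have hdec : pvFuel width height (x + 1) y ≤ fuel := by
            unfold pvFuel at hf ⊢
            generalize (height - y).toNat * (width.toNat + 1) = K at *
            omega
          rw [if_neg hw, if_neg hh, ih (x + 1) y hdec]
          exact (pv_F_step width height _ x y hpos hmiss (by omega) (by omega)).symm

-- A's result is the closed form
theorem pv_A_eq_F (width height current_x current_y step : Int) (hs : step ≠ 0) :
    next_valid_pixel width height current_x current_y step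
      = pvF width height (step.natAbs : Int) current_x current_y :=
  pv_loopA_eq width height step hs _ current_x current_y le_rfl

-- ===== VERDICT (by name: the statements are the Claim_ definitions above) =====
theorem next_valid_pixel_spec : Claim_unchanged_next_valid_pixel := by
  intro width height cx cy step _ hpre
  have hs0 : step ≠ 0 := hpre
  unfold Spec_next_valid_pixel
  intro hnd
  rw [pv_A_eq_F width height cx cy step hs0]
  have hpos : (0:Int) < step.natAbs := by simp [hs0]
  simp only [pvF, next_valid_pixel_alt]
  by_cases h : (PySem.Int.mod (cx + cy) (step.natAbs : Int) == 0) = true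
  · rw [h]; simp
  · have hc := eq_false_of_ne_true h
    rw [hc]
    simp only [Bool.false_eq_true, if_false]
    by_cases hg : cy < height ∧ cx + 1 + PySem.Int.mod (-(cx + 1 + cy)) (step.natAbs : Int) < width
    · rw [if_pos hg, if_pos hg]
    · rw [if_neg hg, if_neg hg]
      by_cases hw : width ≥ 1
      · rw [if_pos hw]
        simp only [pvRows, if_pos hw]
      · rw [if_neg hw]
        simp only [pvRows, if_neg hw]
        -- outside D_, the phantom row A finds is out of range or is (0,0) itself
        have hmiss : PySem.Int.mod (cx + cy) (step.natAbs : Int) ≠ 0 := by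
          simpa [beq_eq_false_iff_ne] using hc
        have hmnn := PySem.Int.mod_nonneg (-(cy + 1)) hpos
        have e1 : pvNextMul step (cx + cy + 1) - cy
            = cx + 1 + PySem.Int.mod (-(cx + 1 + cy)) (step.natAbs : Int) := by
          rw [show -(cx + 1 + cy) = -(cx + cy + 1) by ring, pv_nextMul_eq step _ hpos]; ring
        have e2 : pvNextMul step (cy + 1)
            = cy + 1 + PySem.Int.mod (-(cy + 1)) (step.natAbs : Int) :=
          pv_nextMul_eq step _ hpos
        have hdvd : ¬ step ∣ (cx + cy) := by
          rw [← Int.natAbs_dvd, ← PySem.Int.mod_eq_zero_iff_dvd]; exact hmiss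
        set m := cy + 1 + PySem.Int.mod (-(cy + 1)) (step.natAbs : Int) with hm
        have hnot : ¬ (m < height ∧ m ≠ 0) := by
          rintro ⟨hc1, hc2⟩
          have hcy : cy < height := by omega
          have hx : ¬ (cx + 1 + PySem.Int.mod (-(cx + 1 + cy)) (step.natAbs : Int) < width) :=
            fun hx => hg ⟨hcy, hx⟩
          exact hnd ⟨by omega, hdvd, by omega, by omega, by omega⟩
        by_cases hlt : m < height
        · have : m = 0 := by tauto
          rw [if_pos hlt, this]
        · rw [if_neg hlt]

theorem next_valid_pixel_changed : Claim_changed_next_valid_pixel := by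
  unfold Claim_changed_next_valid_pixel; decide

theorem next_valid_pixel_tight : Claim_exact_next_valid_pixel := by
  intro width height cx cy step _ hpre hd
  obtain ⟨hw, hdvd, hnx', hmh', hm0'⟩ := hd
  have hs0 : step ≠ 0 := hpre
  have hpos : (0:Int) < step.natAbs := by simp [hs0]
  have hmnn := PySem.Int.mod_nonneg (-(cy + 1)) hpos
  have hmiss : PySem.Int.mod (cx + cy) (step.natAbs : Int) ≠ 0 := by
    rw [Ne, PySem.Int.mod_eq_zero_iff_dvd, Int.natAbs_dvd]; exact hdvd
  have e1 : pvNextMul step (cx + cy + 1) - cy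
      = cx + 1 + PySem.Int.mod (-(cx + 1 + cy)) (step.natAbs : Int) := by
    rw [show -(cx + 1 + cy) = -(cx + cy + 1) by ring, pv_nextMul_eq step _ hpos]; ring
  have e2 : pvNextMul step (cy + 1)
      = cy + 1 + PySem.Int.mod (-(cy + 1)) (step.natAbs : Int) :=
    pv_nextMul_eq step _ hpos
  have hnx : PySem.Int.mod (-(cx + 1 + cy)) (step.natAbs : Int) ≥ width - (cx + 1) := by omega
  have hmh : cy + 1 + PySem.Int.mod (-(cy + 1)) (step.natAbs : Int) < height := by omega
  have hm0 : cy + 1 + PySem.Int.mod (-(cy + 1)) (step.natAbs : Int) ≠ 0 := by omega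
  rw [pv_A_eq_F width height cx cy step hs0]
  have hc : (PySem.Int.mod (cx + cy) (step.natAbs : Int) == 0) = false := by
    simpa [beq_eq_false_iff_ne] using hmiss
  have hA : pvF width height (step.natAbs : Int) cx cy
      = [0, cy + 1 + PySem.Int.mod (-(cy + 1)) (step.natAbs : Int)] := by
    simp only [pvF, hc, Bool.false_eq_true, if_false]
    rw [if_neg (by omega), pvRows, if_neg (by omega : ¬ width ≥ 1), if_pos hmh]
  have hB : next_valid_pixel_alt width height cx cy step = [0, 0] := by
    simp only [next_valid_pixel_alt, hc, Bool.false_eq_true, if_false]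
    rw [if_neg (by omega), if_neg (by omega : ¬ width ≥ 1)]
  rw [hA, hB]
  simp only [ne_eq, List.cons.injEq]
  omega
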